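-- pv_equiv track=rewrite | github.com/dsweet99/dryer | test/benchmark_data/module_028.py | compute_28_11
-- ===== SOURCE A (Python) =====
-- def compute_28_11(a, b, c):
--     x = a * 510 + b * 443
--     y = c * 366 - a * 321
--     for i in range(24):
--         x = x + i * 96
--         y = y - i * 51
--         if x > 7910:
--             x = x % 2455
--     return x + y + 309
-- ===== SOURCE B (Python) =====
-- def compute_28_11(a, b, c):
--     # y is decremented by 51*i independently of any branch; 51*(0+1+...+23) = 14076,
--     # so y has the closed form c*366 - a*321 - 14076.  Only x needs the loop.
--     y = c * 366 - a * 321 - 14076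
--     x = a * 510 + b * 443
--     for i in range(24):
--         x += i * 96
--         if x > 7910:
--             x %= 2455
--     return x + y + 309
-- ===== Notes on version B (the rewrite author's own statement) =====
-- stated objective: simpler
-- what changed: y's loop accumulation is replaced by the closed form c*366 - a*321 - 14076 (51 * sum(range(24)) = 14076), so the loop carries only x; the data-dependent modulo branch on x remains iterative.
import Mathlib
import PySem

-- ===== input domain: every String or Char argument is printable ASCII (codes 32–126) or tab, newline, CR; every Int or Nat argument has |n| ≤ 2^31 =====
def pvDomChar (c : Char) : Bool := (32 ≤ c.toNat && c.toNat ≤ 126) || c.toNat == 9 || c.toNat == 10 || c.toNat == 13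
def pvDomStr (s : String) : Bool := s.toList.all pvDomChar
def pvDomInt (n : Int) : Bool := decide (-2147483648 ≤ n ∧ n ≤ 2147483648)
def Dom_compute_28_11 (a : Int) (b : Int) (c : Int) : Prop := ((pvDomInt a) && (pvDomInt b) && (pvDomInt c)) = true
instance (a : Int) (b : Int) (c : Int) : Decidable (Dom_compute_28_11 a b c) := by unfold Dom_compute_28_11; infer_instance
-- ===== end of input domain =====

-- B replaces y's loop accumulation by the closed form c*366 - a*321 - 14076, leaving only x in the loop (objective: simpler).

-- ===== PORT A =====
def compute_28_11 (a : Int) (b : Int) (c : Int) : Int :=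
  let x : Int := a * 510 + b * 443
  let y : Int := c * 366 - a * 321
  let p := (PySem.List.pyRange 0 24 1).foldl
    (fun (p : Int × Int) (i : Int) =>
      let x := p.1 + i * 96
      let y := p.2 - i * 51
      let x := if x > 7910 then PySem.Int.mod x 2455 else x
      (x, y)) (x, y)
  p.1 + p.2 + 309

-- ===== PORT B =====
def pvStepX (x : Int) (i : Int) : Int :=
  let x := x + i * 96
  if x > 7910 then PySem.Int.mod x 2455 else x

def compute_28_11_alt (a : Int) (b : Int) (c : Int) : Int :=
  let y : Int := c * 366 - a * 321 - 14076
  let x := (PySem.List.pyRange 0 24 1).foldl pvStepX (a * 510 + b * 443)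
  x + y + 309

-- ===== PRECONDITION & SPEC =====
def Spec_compute_28_11 (a : Int) (b : Int) (c : Int) (out : Int) : Prop := out = compute_28_11_alt a b c
instance (a : Int) (b : Int) (c : Int) (out : Int) : Decidable (Spec_compute_28_11 a b c out) := by unfold Spec_compute_28_11; infer_instance

-- ===== CLAIM (what is proved, stated in full; the proofs are below) =====
def Claim_equal_compute_28_11 : Prop := ∀ (a : Int) (b : Int) (c : Int), Dom_compute_28_11 a b c → Spec_compute_28_11 a b c (compute_28_11 a b c)

-- ===== LEMMAS AND PROOFS =====

-- The paired fold decomposes: x evolves by pvStepX, y just subtracts 51 * (sum of the list).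
theorem pvFold_split (l : List Int) (x y : Int) :
    l.foldl (fun (p : Int × Int) (i : Int) =>
      let x := p.1 + i * 96
      let y := p.2 - i * 51
      let x := if x > 7910 then PySem.Int.mod x 2455 else x
      (x, y)) (x, y)
    = (l.foldl pvStepX x, y - 51 * l.sum) := by
  induction l generalizing x y with
  | nil => simp
  | cons h t ih =>
      simp only [List.foldl_cons, List.sum_cons, ih, pvStepX]
      refine Prod.ext rfl ?_
      push_cast
      ring

theorem pvSumRange : (PySem.List.pyRange 0 24 1).sum = 276 := by decide

-- ===== VERDICT (by name: the statement is the Claim_ definition above) =====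
theorem compute_28_11_spec : Claim_equal_compute_28_11 := by
  intro a b c _
  show compute_28_11 a b c = compute_28_11_alt a b c
  unfold compute_28_11 compute_28_11_alt
  simp only [pvFold_split, pvSumRange]
  ring_nf
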